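-- pv_equiv track=rewrite | github.com/broadinstitute/ml4h | tensormap/utils/ecg.py | _high_pass_filter
-- ===== SOURCE A (Python) =====
-- def _high_pass_filter(signal):
--     result = []
--     for index, value in enumerate(signal):
--         value = -value
--         if index >= 1:
--             value -= result[index - 1]
--         if index >= 16:
--             value += 32 * signal[index - 16]
--         if index >= 32:
--             value += signal[index - 32]
--         result.append(value)
--     return result
-- ===== SOURCE B (Python) =====
-- def _high_pass_filter(sig):
--     # Pass 1: stateless feed-forward terms.
--     ff = []
--     for i in range(len(sig)):
--         v = -sig[i]
--         if i >= 16: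
--             v += 32 * sig[i - 16]
--         if i >= 32:
--             v += sig[i - 32]
--         ff.append(v)
--     # Pass 2: first-order feedback recurrence with a running prev.
--     result = []
--     prev = 0
--     for v in ff:
--         cur = v - prev
--         result.append(cur)
--         prev = cur
--     return result
-- ===== Notes on version B (the rewrite author's own statement) =====
-- stated objective: alternative
-- what changed: Splits the single stateful loop into two differently-shaped passes: a stateless feed-forward pass building ff[i] = -s[i] + 32*s[i-16] + s[i-32], then a first-order feedback scan result[i] = ff[i] - prev with a running prev instead of re-indexing the result list.
import Mathlib
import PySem

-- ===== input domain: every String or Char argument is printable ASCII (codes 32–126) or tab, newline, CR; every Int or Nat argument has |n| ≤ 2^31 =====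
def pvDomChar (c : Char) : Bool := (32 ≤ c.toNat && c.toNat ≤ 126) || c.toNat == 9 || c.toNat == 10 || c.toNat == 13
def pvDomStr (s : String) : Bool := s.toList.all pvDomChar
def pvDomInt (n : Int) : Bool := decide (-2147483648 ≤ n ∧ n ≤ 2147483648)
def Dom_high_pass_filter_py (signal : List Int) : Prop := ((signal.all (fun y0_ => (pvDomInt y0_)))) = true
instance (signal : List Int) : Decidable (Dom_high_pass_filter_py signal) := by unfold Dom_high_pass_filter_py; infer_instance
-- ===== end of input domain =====

-- B replaces A's single stateful loop (which re-indexes its own output list) by two passes: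
-- a stateless feed-forward map, then a running-prev feedback scan. Alternative decomposition, same cost.

-- ===== PORT A =====
-- loop body of A's single for-loop (index/value from enumerate; result[index-1] via pyGetD: the index is always in range)
def hpfStepA (signal : List Int) (result : List Int) (iv : Int × Int) : List Int :=
  let index := iv.1
  let value := -iv.2
  let value := if 1 ≤ index then value - PySem.List.pyGetD result (index - 1) 0 else value
  let value := if 16 ≤ index then value + 32 * PySem.List.pyGetD signal (index - 16) 0 else value
  let value := if 32 ≤ index then value + PySem.List.pyGetD signal (index - 32) 0 else value
  result ++ [value]

def high_pass_filter_py (signal : List Int) : List Int :=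
  (PySem.List.enumerate signal 0).foldl (hpfStepA signal) []

-- ===== PORT B =====
-- pass 1: feed-forward term at index i (stateless)
def hpfFF (signal : List Int) (i : Int) : Int :=
  let v := -(PySem.List.pyGetD signal i 0)
  let v := if 16 ≤ i then v + 32 * PySem.List.pyGetD signal (i - 16) 0 else v
  let v := if 32 ≤ i then v + PySem.List.pyGetD signal (i - 32) 0 else v
  v

-- pass 2: feedback scan step on state (result, prev)
def hpfStepB (st : List Int × Int) (v : Int) : List Int × Int :=
  let cur := v - st.2
  (st.1 ++ [cur], cur)

def high_pass_filter_py_alt (signal : List Int) : List Int :=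
  let ff := (PySem.List.pyRange 0 signal.length 1).map (hpfFF signal)
  (ff.foldl hpfStepB ([], 0)).1

-- ===== PRECONDITION & SPEC =====
def Spec_high_pass_filter_py (signal : List Int) (out : List Int) : Prop := out = high_pass_filter_py_alt signal
instance (signal : List Int) (out : List Int) : Decidable (Spec_high_pass_filter_py signal out) := by unfold Spec_high_pass_filter_py; infer_instance

-- ===== CLAIM (what is proved, stated in full; the proofs are below) =====
def Claim_equal_high_pass_filter_py : Prop := ∀ (signal : List Int), Dom_high_pass_filter_py signal → Spec_high_pass_filter_py signal (high_pass_filter_py signal)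

-- ===== LEMMAS AND PROOFS =====

-- A's loop body at index k (with the accumulated result a, |a| = k) appends exactly
-- B's feed-forward term minus the previous output (0 when a is empty).
theorem hpf_stepA_eq (signal a : List Int) (k : Nat) (hk : k < signal.length) (hlen : a.length = k) :
    hpfStepA signal a ((k:Int), signal[k]) = a ++ [hpfFF signal (k:Int) - (a.getLast?).getD 0] := by
  unfold hpfStepA hpfFF
  rcases Nat.eq_zero_or_pos k with h0 | hpos
  · subst h0
    have ha : a = [] := List.eq_nil_of_length_eq_zero hlen
    subst ha
    simp [PySem.List.pyGetD_zero, List.getD_eq_getElem?_getD, List.getElem?_eq_getElem hk]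
  · have h1 : (1:Int) ≤ (k:Int) := by exact_mod_cast hpos
    have hc : (k:Int) - 1 = ((k-1 : Nat) : Int) := by omega
    have hlast : PySem.List.pyGetD a ((k:Int) - 1) 0 = (a.getLast?).getD 0 := by
      rw [hc, PySem.List.pyGetD_natCast]
      rw [List.getLast?_eq_getElem?]
      simp [List.getD_eq_getElem?_getD, hlen]
    have hget : PySem.List.pyGetD signal ((k:Int)) 0 = signal[k] := by
      rw [PySem.List.pyGetD_natCast]
      simp [List.getD_eq_getElem?_getD, List.getElem?_eq_getElem hk]
    simp only [hget, hlast, if_pos h1]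
    split_ifs <;> simp <;> ring

-- loop invariant over the first k indices: A's accumulated result equals B's, its length is k,
-- and B's running prev is the last element of A's result (0 when empty)
theorem hpf_invariant (signal : List Int) : ∀ k, k ≤ signal.length →
    (PySem.List.enumerate (signal.take k) 0).foldl (hpfStepA signal) []
      = ((((PySem.List.pyRange 0 signal.length 1).map (hpfFF signal)).take k).foldl hpfStepB ([], 0)).1
    ∧ ((PySem.List.enumerate (signal.take k) 0).foldl (hpfStepA signal) []).length = k
    ∧ ((((PySem.List.pyRange 0 signal.length 1).map (hpfFF signal)).take k).foldl hpfStepB ([], 0)).2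
      = (((PySem.List.enumerate (signal.take k) 0).foldl (hpfStepA signal) []).getLast?).getD 0 := by
  intro k
  induction k with
  | zero => intro _; simp
  | succ k ih =>
    intro hk1
    have hk : k < signal.length := hk1
    obtain ⟨h1, h2, h3⟩ := ih (le_of_lt hk)
    have htake : signal.take (k+1) = signal.take k ++ [signal[k]] := by
      rw [List.take_add_one, List.getElem?_eq_getElem hk]; simp
    have hff : ((PySem.List.pyRange 0 signal.length 1).map (hpfFF signal)).take (k+1)
        = ((PySem.List.pyRange 0 signal.length 1).map (hpfFF signal)).take k ++ [hpfFF signal (k:Int)] := by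
      rw [List.take_add_one, PySem.List.getElem?_map_pyRange_zero _ _ _ hk]; simp
    rw [htake, hff, PySem.List.enumerate_append, List.foldl_append, List.foldl_append]
    have hlen : ((signal.take k).length : Int) = (k : Int) := by
      simp [List.length_take, le_of_lt hk]
    simp only [PySem.List.enumerate_cons, PySem.List.enumerate_nil, List.foldl_cons,
      List.foldl_nil, hlen, zero_add]
    rw [hpf_stepA_eq signal _ k hk h2]
    refine ⟨?_, ?_, ?_⟩
    · rw [← h3, h1]; simp [hpfStepB]
    · simp [h2]
    · rw [← h3]; simp [hpfStepB]

-- ===== VERDICT (by name: the statement is the Claim_ definition above) =====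
theorem high_pass_filter_py_spec : Claim_equal_high_pass_filter_py := by
  intro signal _
  unfold Spec_high_pass_filter_py high_pass_filter_py high_pass_filter_py_alt
  have h := (hpf_invariant signal signal.length le_rfl).1
  simpa [List.take_of_length_le, PySem.List.length_pyRange_one] using h
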